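-- pv_equiv track=rewrite | github.com/trminhit/Bao_Cao_Ca_Nhan_8Rooks | algorithms/PartialObservable.py | belief_move
-- ===== SOURCE A (Python) =====
-- def belief_move(belief, n, prefix_len):
--     """Sinh belief mới bằng hành động MOVE:
--        - Mỗi state move 1 quân (từ hàng >= prefix_len)
--        - State full thì giữ nguyên"""
--     new_belief = []
--
--     for state in belief:
--         if len(state) == n:
--             # full rồi thì giữ nguyên
--             new_belief.append(state)
--             continue
--
--         moved = False
--         # chỉ move được nếu có hàng >= prefix_len
--         if len(state) > prefix_len:
--             for r in range(prefix_len, len(state)):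
--                 for col in range(n):
--                     if col != state[r] and col not in state:
--                         new_state = state.copy()
--                         new_state[r] = col
--                         new_belief.append(new_state)
--                         moved = True
--                         break
--                 if moved:
--                     break
--         if not moved:
--             # nếu không move được (hoặc chưa đủ hàng để move)
--             new_belief.append(state)
--     return new_belief
-- ===== SOURCE B (Python) =====
-- def belief_move(belief, n, prefix_len):
--     out = []
--     for state in belief:
--         if len(state) != n and len(state) > prefix_len:
--             # smallest column not used by state = first gap in the sorted distinct values
--             mex = 0
--             for v in sorted(set(state)):
--                 if v == mex:
--                     mex += 1
--                 elif v > mex: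
--                     break
--             if mex < n:
--                 state = state.copy()
--                 state[prefix_len] = mex
--         out.append(state)
--     return out
-- ===== Notes on version B (the rewrite author's own statement) =====
-- stated objective: alternative
-- what changed: Replaces A's nested row/column search (for each row, scan all n candidate columns with 'col not in state' membership tests and break flags) by a per-state mex computation: sort the distinct values of the state and scan once for the first gap, which is the column the move uses; no loop over range(n) and no membership tests remain.
import Mathlib
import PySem

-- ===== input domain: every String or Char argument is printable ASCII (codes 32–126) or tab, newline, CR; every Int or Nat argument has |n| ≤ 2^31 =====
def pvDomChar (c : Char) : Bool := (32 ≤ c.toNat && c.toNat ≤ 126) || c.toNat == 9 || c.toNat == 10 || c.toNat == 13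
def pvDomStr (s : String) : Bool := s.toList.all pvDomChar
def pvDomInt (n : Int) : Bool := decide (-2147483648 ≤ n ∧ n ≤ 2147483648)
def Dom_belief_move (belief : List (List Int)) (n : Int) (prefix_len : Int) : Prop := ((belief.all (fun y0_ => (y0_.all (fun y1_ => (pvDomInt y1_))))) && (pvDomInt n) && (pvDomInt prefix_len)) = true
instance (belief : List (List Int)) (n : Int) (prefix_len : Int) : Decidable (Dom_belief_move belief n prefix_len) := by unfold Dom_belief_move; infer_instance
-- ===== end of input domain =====

-- B replaces A's nested row/column candidate search by a per-state mex: sort the state's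
-- distinct values and scan once for the first gap (objective: alternative decomposition).

-- ===== PORT A =====
-- inner 'for col in range(n)' loop with its break: first col with col != state[r] and col not in state
def aFindCol (state : List Int) (r : Int) : List Int → Option Int
  | [] => none
  | c :: cs =>
    if c ≠ PySem.List.pyGetD state r 0 ∧ c ∉ state then some c
    else aFindCol state r cs

-- outer 'for r in range(prefix_len, len(state))' loop with its break via the moved flag
def aRows (state : List Int) (n : Int) : List Int → Option (List Int)
  | [] => none
  | r :: rs =>
    match aFindCol state r (PySem.List.pyRange 0 n 1) with
    | some c => some (PySem.List.pySetD state r c)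
    | none => aRows state n rs

def belief_move (belief : List (List Int)) (n : Int) (prefix_len : Int) : List (List Int) :=
  belief.foldl (fun new_belief state =>
    if PySem.List.len state = n then new_belief ++ [state]
    else
      match (if prefix_len < PySem.List.len state then
               aRows state n (PySem.List.pyRange prefix_len (PySem.List.len state) 1)
             else none) with
      | some new_state => new_belief ++ [new_state]
      | none => new_belief ++ [state]) []

-- ===== PORT B =====
-- 'for v in sorted(set(state)): if v == mex: mex += 1 elif v > mex: break'
def bMexLoop : List Int → Int → Int
  | [], m => m
  | v :: vs, m => if v = m then bMexLoop vs (m + 1) else if m < v then m else bMexLoop vs m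

def bStep (n : Int) (prefix_len : Int) (state : List Int) : List Int :=
  if PySem.List.len state ≠ n ∧ prefix_len < PySem.List.len state then
    let mex := bMexLoop (PySem.List.sorted (PySem.Set.ofList state) (fun x => x) false) 0
    if mex < n then PySem.List.pySetD state prefix_len mex else state
  else state

def belief_move_alt (belief : List (List Int)) (n : Int) (prefix_len : Int) : List (List Int) :=
  belief.foldl (fun out state => out ++ [bStep n prefix_len state]) []

-- ===== PRECONDITION & SPEC =====
-- Pre_ excludes exactly the inputs on which A raises IndexError: some state with len(state) != n
-- while n >= 1 and prefix_len < -len(state), where reading state[prefix_len] wraps out of range.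
def Pre_belief_move (belief : List (List Int)) (n : Int) (prefix_len : Int) : Prop :=
  ∀ s ∈ belief, (s.length : Int) = n ∨ n ≤ 0 ∨ -(s.length : Int) ≤ prefix_len
instance (belief : List (List Int)) (n : Int) (prefix_len : Int) : Decidable (Pre_belief_move belief n prefix_len) := by unfold Pre_belief_move; infer_instance

def pvWitness_belief_move : List (List Int) × Int × Int := ([[0, 1], [2]], 3, 1)

def Spec_belief_move (belief : List (List Int)) (n : Int) (prefix_len : Int) (out : List (List Int)) : Prop := out = belief_move_alt belief n prefix_len
instance (belief : List (List Int)) (n : Int) (prefix_len : Int) (out : List (List Int)) : Decidable (Spec_belief_move belief n prefix_len out) := by unfold Spec_belief_move; infer_instance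

-- ===== CLAIM (what is proved, stated in full; the proofs are below) =====
def Claim_equal_belief_move : Prop := ∀ (belief : List (List Int)) (n : Int) (prefix_len : Int), Dom_belief_move belief n prefix_len → Pre_belief_move belief n prefix_len → Spec_belief_move belief n prefix_len (belief_move belief n prefix_len)

-- ===== LEMMAS AND PROOFS =====

-- A's per-state branch, named so the fold can be rewritten to a map
def aStep (n : Int) (prefix_len : Int) (state : List Int) : List Int :=
  if PySem.List.len state = n then state
  else
    match (if prefix_len < PySem.List.len state then
             aRows state n (PySem.List.pyRange prefix_len (PySem.List.len state) 1)
           else none) with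
    | some new_state => new_state
    | none => state

lemma belief_move_eq_map (belief : List (List Int)) (n prefix_len : Int) :
    belief_move belief n prefix_len = belief.map (aStep n prefix_len) := by
  unfold belief_move
  have hbody : (fun (new_belief : List (List Int)) (state : List Int) =>
      if PySem.List.len state = n then new_belief ++ [state]
      else
        match (if prefix_len < PySem.List.len state then
                 aRows state n (PySem.List.pyRange prefix_len (PySem.List.len state) 1)
               else none) with
        | some new_state => new_belief ++ [new_state]
        | none => new_belief ++ [state])
      = (fun (new_belief : List (List Int)) (state : List Int) =>
          new_belief ++ [aStep n prefix_len state]) := by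
    funext acc s
    unfold aStep
    simp only [PySem.List.len_eq]
    by_cases h : (s.length : Int) = n
    · simp only [if_pos h]
    · simp only [if_neg h]
      cases (if prefix_len < (s.length : Int) then
          aRows s n (PySem.List.pyRange prefix_len (s.length : Int) 1) else none) <;>
        rfl
  rw [hbody]
  exact PySem.List.foldl_append_singleton_eq_map ..

lemma belief_move_alt_eq_map (belief : List (List Int)) (n prefix_len : Int) :
    belief_move_alt belief n prefix_len = belief.map (bStep n prefix_len) := by
  unfold belief_move_alt
  exact PySem.List.foldl_append_singleton_eq_map ..

lemma aFindCol_none (state : List Int) (r : Int) (cols : List Int)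
    (h : ∀ c ∈ cols, c ∈ state) : aFindCol state r cols = none := by
  induction cols with
  | nil => rfl
  | cons c cs ih =>
    simp only [aFindCol]
    rw [if_neg, ih (fun x hx => h x (List.mem_cons_of_mem _ hx))]
    simp [h c (List.mem_cons_self ..)]

lemma aRows_none (state : List Int) (n : Int) (rows : List Int)
    (h : ∀ c ∈ PySem.List.pyRange 0 n 1, c ∈ state) : aRows state n rows = none := by
  induction rows with
  | nil => rfl
  | cons r rs ih => simp only [aRows, aFindCol_none state r _ h, ih]

lemma aFindCol_eq_filter_head (state : List Int) (r : Int) (cols : List Int)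
    (hmem : PySem.List.pyGetD state r 0 ∈ state) :
    aFindCol state r cols = (cols.filter (fun c => decide (c ∉ state))).head? := by
  induction cols with
  | nil => rfl
  | cons c cs ih =>
    simp only [aFindCol, List.filter_cons]
    by_cases hc : c ∈ state
    · rw [if_neg (by simp [hc]), ih]; simp [hc]
    · rw [if_pos ⟨fun he => hc (he ▸ hmem), hc⟩]; simp [hc]

-- invariant of B's gap scan: on a strictly increasing list, it returns
-- the least value ≥ m that is not in the list
lemma bMexLoop_spec (l : List Int) (m : Int) (hsort : l.Pairwise (· < ·)) :
    m ≤ bMexLoop l m ∧ bMexLoop l m ∉ l ∧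
      ∀ k, m ≤ k → k < bMexLoop l m → k ∈ l := by
  induction l generalizing m with
  | nil => exact ⟨le_refl m, by simp [bMexLoop], fun k h1 h2 => absurd (lt_of_le_of_lt h1 h2) (by simp [bMexLoop])⟩
  | cons v vs ih =>
    have hvs : vs.Pairwise (· < ·) := hsort.of_cons
    have hvlt : ∀ x ∈ vs, v < x := fun x hx => (List.pairwise_cons.mp hsort).1 x hx
    by_cases hv : v = m
    · obtain ⟨h1, h2, h3⟩ := ih (m + 1) hvs
      refine ⟨by simp [bMexLoop, hv]; omega, ?_, ?_⟩
      · simp only [bMexLoop, hv, if_true]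
        intro hmem
        rcases List.mem_cons.mp hmem with he | he
        · omega
        · exact h2 he
      · intro k hk1 hk2
        simp only [bMexLoop, hv, if_true] at hk2
        rcases eq_or_lt_of_le hk1 with he | hlt
        · exact List.mem_cons.mpr (Or.inl (by omega))
        · exact List.mem_cons.mpr (Or.inr (h3 k (by omega) hk2))
    · by_cases hmv : m < v
      · refine ⟨?_, ?_, ?_⟩
        · simp [bMexLoop, hv, hmv]
        · simp only [bMexLoop, if_neg hv, if_pos hmv]
          intro hmem
          rcases List.mem_cons.mp hmem with he | he
          · omega
          · exact absurd (hvlt m he) (by omega)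
        · intro k hk1 hk2
          simp only [bMexLoop, if_neg hv, if_pos hmv] at hk2
          omega
      · obtain ⟨h1, h2, h3⟩ := ih m hvs
        have hvm : v < m := by omega
        refine ⟨?_, ?_, ?_⟩
        · simpa [bMexLoop, hv, hmv] using h1
        · simp only [bMexLoop, if_neg hv, if_neg hmv]
          intro hmem
          rcases List.mem_cons.mp hmem with he | he
          · omega
          · exact h2 he
        · intro k hk1 hk2
          simp only [bMexLoop, if_neg hv, if_neg hmv] at hk2
          exact List.mem_cons.mpr (Or.inr (h3 k hk1 hk2))

-- B's mex over sorted(set(state)): least non-negative integer not in state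
lemma mex_spec (state : List Int) :
    0 ≤ bMexLoop (PySem.List.sorted (PySem.Set.ofList state) (fun x => x) false) 0 ∧
    bMexLoop (PySem.List.sorted (PySem.Set.ofList state) (fun x => x) false) 0 ∉ state ∧
    ∀ k, 0 ≤ k → k < bMexLoop (PySem.List.sorted (PySem.Set.ofList state) (fun x => x) false) 0 → k ∈ state := by
  have hmem : ∀ x, x ∈ PySem.List.sorted (PySem.Set.ofList state) (fun x => x) false ↔ x ∈ state := by
    intro x
    rw [PySem.List.mem_sorted, PySem.Set.mem_ofList]
  obtain ⟨h1, h2, h3⟩ := bMexLoop_spec _ 0 (PySem.List.sorted_ofList_pairwise_lt state)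
  exact ⟨h1, fun h => h2 ((hmem _).mpr h), fun k hk1 hk2 => (hmem _).mp (h3 k hk1 hk2)⟩

lemma aStep_eq_bStep (state : List Int) (n prefix_len : Int)
    (hpre : (state.length : Int) = n ∨ n ≤ 0 ∨ -(state.length : Int) ≤ prefix_len) :
    aStep n prefix_len state = bStep n prefix_len state := by
  unfold aStep bStep
  simp only [PySem.List.len_eq]
  obtain ⟨hmu0, hmunot, hmuall⟩ := mex_spec state
  set μ := bMexLoop (PySem.List.sorted (PySem.Set.ofList state) (fun x => x) false) 0 with hμ
  by_cases h1 : (state.length : Int) = n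
  · rw [if_pos h1, if_neg (by simp [h1])]
  rw [if_neg h1]
  by_cases h2 : prefix_len < (state.length : Int)
  · rw [if_pos h2, if_pos ⟨h1, h2⟩]
    rcases hpre with hn | hn | hn
    · exact absurd hn h1
    · have hr : PySem.List.pyRange 0 n 1 = [] := by simp [pysem, hn]
      rw [aRows_none state n _ (by simp [hr])]
      simp only []
      rw [if_neg (by omega)]
    · -- prefix_len is an in-range (possibly negative) index into state
      have hin : PySem.Raise.InRange state.length prefix_len := by
        constructor <;> omega
      have hmem : PySem.List.pyGetD state prefix_len 0 ∈ state :=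
        PySem.List.pyGetD_mem state 0 hin
      have hcons : PySem.List.pyRange prefix_len ((state.length : Int)) 1
          = prefix_len :: PySem.List.pyRange (prefix_len + 1) ((state.length : Int)) 1 :=
        PySem.List.pyRange_one_cons h2
      rw [hcons]
      simp only [aRows, aFindCol_eq_filter_head state prefix_len _ hmem]
      by_cases hμn : μ < n
      · -- range 0..n splits at μ; everything below μ is in state, μ is not
        have hsplit : PySem.List.pyRange 0 n 1
            = PySem.List.pyRange 0 μ 1 ++ PySem.List.pyRange μ n 1 :=
          PySem.List.pyRange_one_append 0 μ n hmu0 (le_of_lt hμn)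
        have hlow : (PySem.List.pyRange 0 μ 1).filter (fun c => decide (c ∉ state)) = [] := by
          rw [List.filter_eq_nil_iff]
          intro c hc
          have := PySem.List.mem_pyRange_one.mp hc
          simpa using hmuall c this.1 this.2
        have hμcons : PySem.List.pyRange μ n 1
            = μ :: PySem.List.pyRange (μ + 1) n 1 := PySem.List.pyRange_one_cons hμn
        rw [hsplit, List.filter_append, hlow, hμcons, List.filter_cons,
          if_pos (by simpa using hmunot)]
        simp [hμn]
      · -- no missing column in range(n): A keeps scanning all rows and keeps state
        have hall : ∀ c ∈ PySem.List.pyRange 0 n 1, c ∈ state := by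
          intro c hc
          have := PySem.List.mem_pyRange_one.mp hc
          exact hmuall c this.1 (by omega)
        have hfil : (PySem.List.pyRange 0 n 1).filter (fun c => decide (c ∉ state)) = [] := by
          rw [List.filter_eq_nil_iff]; intro c hc; simpa using hall c hc
        rw [hfil]
        simp only [List.head?_nil]
        rw [aRows_none state n _ hall]
        simp [hμn]
  · rw [if_neg h2, if_neg (by tauto)]

-- ===== VERDICT (by name: the statement is the Claim_ definition above) =====
theorem belief_move_spec : Claim_equal_belief_move := by
  intro belief n prefix_len _ hpre
  unfold Spec_belief_move
  rw [belief_move_eq_map, belief_move_alt_eq_map]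
  exact List.map_congr_left (fun s hs => aStep_eq_bStep s n prefix_len (hpre s hs))
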